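-- pv_equiv track=rewrite | github.com/vinchinzu/euler | python/782/check_comp3.py | find_min_complexity
-- ===== SOURCE A (Python) =====
-- def find_min_complexity(n, k):
--     """Find a matrix with n rows, n cols, k ones, and minimum complexity.
--     Use construction: try all 2-row-type arrangements.
--     """
--     if k == 0 or k == n*n:
--         return 1
--
--     min_comp = n + n  # worst case
--
--     # Try 2-row-type construction with various arrangements
--     for b1 in range(n+1):  # weight of row type 1
--         for b2 in range(n+1):  # weight of row type 2
--             for a in range(n+1):  # number of type-1 rows
--                 kk = a * b1 + (n - a) * b2
--                 if kk != k:
--                     continue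
--
--                 # Row types: P has 1s in positions 0..b1-1, Q has 1s in positions 0..b2-1.
--                 # We need to choose which rows are type 1 vs 2.
--                 # Try block arrangement: first a rows are type 1.
--                 P = tuple([1]*b1 + [0]*(n-b1))
--                 Q = tuple([1]*b2 + [0]*(n-b2))
--
--                 # Build matrix with first a rows = P
--                 matrix = [list(P)] * a + [list(Q)] * (n - a)
--
--                 # Compute complexity
--                 patterns = set()
--                 for row in matrix:
--                     patterns.add(tuple(row))
--                 for j in range(n):
--                     col = tuple(matrix[i][j] for i in range(n))
--                     patterns.add(col)
--                 comp = len(patterns)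
--                 min_comp = min(min_comp, comp)
--
--                 # Also try other row arrangements
--                 # Specifically, arrange rows so some column matches a row pattern
--                 # This is where it gets tricky. Let me try placing type-1 rows
--                 # at specific positions.
--
--                 # What if we place type-1 rows at positions 0..a-1?
--                 # Then column j:
--                 # j < min(b1,b2): col = all-ones
--                 # j in range only type 1: col = (1^a, 0^{n-a})
--                 # j in range only type 2: col = (0^a, 1^{n-a})
--                 # j >= max(b1,b2): col = all-zeros
--
--                 # What if we place type-1 rows to match some column pattern?
--                 # E.g., place type-1 rows at positions 0..b1-1 (matching P's 1 positions)
--                 if a == b1 and a <= n: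
--                     sigma = [1]*a + [0]*(n-a)
--                     matrix2 = []
--                     for i in range(n):
--                         if sigma[i]:
--                             matrix2.append(list(P))
--                         else:
--                             matrix2.append(list(Q))
--                     patterns2 = set()
--                     for row in matrix2:
--                         patterns2.add(tuple(row))
--                     for j in range(n):
--                         col = tuple(matrix2[i][j] for i in range(n))
--                         patterns2.add(col)
--                     min_comp = min(min_comp, len(patterns2))
--
--     return min_comp
-- ===== SOURCE B (Python) =====
-- def find_min_complexity(n, k):
--     """Find a matrix with n rows, n cols, k ones, and minimum complexity.
--     Same 2-row-type search, but (1) the number of type-1 rows `a` is solved from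
--     a*b1 + (n-a)*b2 == k instead of being enumerated, and (2) the number of
--     distinct row/column patterns is computed analytically instead of building
--     and scanning the n*n matrix."""
--     if k == 0 or k == n * n:
--         return 1
--
--     best = n + n
--     for b1 in range(n + 1):
--         for b2 in range(n + 1):
--             if b1 == b2:
--                 # a*b1 + (n-a)*b2 == n*b2 for every a, and the pattern count
--                 # does not depend on a either: use a = 0.
--                 if n * b2 != k:
--                     continue
--                 a = 0
--             else:
--                 num = k - n * b2
--                 den = b1 - b2
--                 if num % den != 0:
--                     continue
--                 a = num // den
--                 if a < 0 or a > n: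
--                     continue
--             # Every row/column pattern is a "step" vector 1^b 0^(n-b), except
--             # the reversed step 0^a 1^(n-a) from the columns covered only by
--             # the type-2 rows.
--             vals = set()
--             if a > 0:
--                 vals.add(b1)                 # rows of type 1
--             if a < n:
--                 vals.add(b2)                 # rows of type 2
--             if min(b1, b2) > 0 or (b2 > b1 and a == 0):
--                 vals.add(n)                  # all-ones columns
--             if max(b1, b2) < n or (b2 > b1 and a == n):
--                 vals.add(0)                  # all-zeros columns
--             if b1 > b2:
--                 vals.add(a)                  # columns 1^a 0^(n-a)
--             comp = len(vals) + (1 if b2 > b1 and 0 < a < n else 0)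
--             best = min(best, comp)
--     return best
-- ===== Notes on version B (the rewrite author's own statement) =====
-- stated objective: faster
-- what changed: B keeps the search over row weights (b1,b2) but solves the linear equation a*b1+(n-a)*b2=k for the number a of type-1 rows instead of enumerating a, and replaces the O(n^2) inner work (building the n x n matrix and collecting row/column tuples into a set, twice) with an O(1) analytic count of the distinct step-vector patterns.
import Mathlib
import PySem

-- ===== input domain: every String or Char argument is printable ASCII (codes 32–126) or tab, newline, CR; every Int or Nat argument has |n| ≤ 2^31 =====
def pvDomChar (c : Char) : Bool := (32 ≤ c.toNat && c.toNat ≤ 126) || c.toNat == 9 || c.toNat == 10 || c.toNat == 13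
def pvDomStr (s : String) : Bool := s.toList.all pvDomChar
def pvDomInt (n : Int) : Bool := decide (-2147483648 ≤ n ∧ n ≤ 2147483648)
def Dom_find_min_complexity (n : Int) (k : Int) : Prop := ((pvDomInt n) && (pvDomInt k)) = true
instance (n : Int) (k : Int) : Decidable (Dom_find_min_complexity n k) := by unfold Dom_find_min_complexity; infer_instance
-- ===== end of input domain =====

-- B solves a*b1+(n-a)*b2 = k for a instead of enumerating a, and counts the distinct
-- row/column patterns analytically instead of building and scanning the n*n matrix.

-- ===== PORT A =====

-- [x]*m in Python (m may be ≤ 0: empty list) — exact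
def pvRepeat {α : Type} (x : α) (m : Int) : List α := List.replicate m.toNat x

-- the two pattern-collecting loops of A (rows, then columns); used verbatim for
-- A's `patterns` and `patterns2`
def pvPatterns (n : Int) (matrix : List (List Int)) : PySem.Set (List Int) :=
  let patterns := matrix.foldl (fun s row => PySem.Set.add s row) PySem.Set.empty
  (PySem.List.pyRange 0 n 1).foldl
    (fun s j => PySem.Set.add s
      ((PySem.List.pyRange 0 n 1).map
        (fun i => PySem.List.pyGetD (PySem.List.pyGetD matrix i []) j 0))) patterns

-- the body of A's innermost loop (from `kk = ...` to the update of `min_comp`)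
def pvBodyA (n k b1 b2 a mc : Int) : Int :=
  let kk := a * b1 + (n - a) * b2
  if kk ≠ k then mc
  else
    let P := pvRepeat (1 : Int) b1 ++ pvRepeat 0 (n - b1)
    let Q := pvRepeat (1 : Int) b2 ++ pvRepeat 0 (n - b2)
    let matrix := pvRepeat P a ++ pvRepeat Q (n - a)
    let comp := PySem.Set.len (pvPatterns n matrix)
    let mc' := min mc comp
    if a = b1 ∧ a ≤ n then
      let sigma := pvRepeat (1 : Int) a ++ pvRepeat 0 (n - a)
      let matrix2 := (PySem.List.pyRange 0 n 1).foldl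
        (fun m i => m ++ [if PySem.List.pyGetD sigma i 0 ≠ 0 then P else Q]) []
      min mc' (PySem.Set.len (pvPatterns n matrix2))
    else mc'

def find_min_complexity (n : Int) (k : Int) : Int :=
  if k = 0 ∨ k = n * n then 1
  else
    (PySem.List.pyRange 0 (n + 1) 1).foldl (fun mc b1 =>
      (PySem.List.pyRange 0 (n + 1) 1).foldl (fun mc b2 =>
        (PySem.List.pyRange 0 (n + 1) 1).foldl (fun mc a =>
          pvBodyA n k b1 b2 a mc) mc) mc) (n + n)

-- ===== PORT B =====

-- B's analytic pattern count for the candidate (b1, b2, a)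
def pvCompB (n b1 b2 a : Int) : Int :=
  let vals : PySem.Set Int := PySem.Set.empty
  let vals := if 0 < a then PySem.Set.add vals b1 else vals
  let vals := if a < n then PySem.Set.add vals b2 else vals
  let vals := if 0 < min b1 b2 ∨ (b1 < b2 ∧ a = 0) then PySem.Set.add vals n else vals
  let vals := if max b1 b2 < n ∨ (b1 < b2 ∧ a = n) then PySem.Set.add vals 0 else vals
  let vals := if b2 < b1 then PySem.Set.add vals a else vals
  PySem.Set.len vals + (if b1 < b2 ∧ 0 < a ∧ a < n then 1 else 0)

-- the body of B's inner loop: solve for a, then count analytically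
def pvBodyB (n k b1 b2 best : Int) : Int :=
  if b1 = b2 then
    if n * b2 ≠ k then best
    else min best (pvCompB n b1 b2 0)
  else
    let num := k - n * b2
    let den := b1 - b2
    if PySem.Int.mod num den ≠ 0 then best
    else
      let a := PySem.Int.floordiv num den
      if a < 0 ∨ a > n then best
      else min best (pvCompB n b1 b2 a)

def find_min_complexity_alt (n : Int) (k : Int) : Int :=
  if k = 0 ∨ k = n * n then 1
  else
    (PySem.List.pyRange 0 (n + 1) 1).foldl (fun best b1 =>
      (PySem.List.pyRange 0 (n + 1) 1).foldl (fun best b2 =>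
        pvBodyB n k b1 b2 best) best) (n + n)

-- ===== PRECONDITION & SPEC =====
def Spec_find_min_complexity (n : Int) (k : Int) (out : Int) : Prop := out = find_min_complexity_alt n k
instance (n : Int) (k : Int) (out : Int) : Decidable (Spec_find_min_complexity n k out) := by unfold Spec_find_min_complexity; infer_instance

-- ===== CLAIM (what is proved, stated in full; the proofs are below) =====
def Claim_equal_find_min_complexity : Prop := ∀ (n : Int) (k : Int), Dom_find_min_complexity n k → Spec_find_min_complexity n k (find_min_complexity n k)

-- ===== LEMMAS AND PROOFS =====

-- 1^b 0^(N-b) : the row patterns, and all column patterns except pvAnti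
def pvStep (N b : Nat) : List Int := List.replicate b 1 ++ List.replicate (N - b) 0

-- 0^A 1^(N-A) : the pattern of the columns covered only by the type-2 rows
def pvAnti (N A : Nat) : List Int := List.replicate A 0 ++ List.replicate (N - A) 1

-- B's `vals`, over naturals
def pvVals (N A B1 B2 : Nat) : PySem.Set Int :=
  let v : PySem.Set Int := PySem.Set.empty
  let v := if 0 < A then PySem.Set.add v B1 else v
  let v := if A < N then PySem.Set.add v B2 else v
  let v := if 0 < min B1 B2 ∨ (B1 < B2 ∧ A = 0) then PySem.Set.add v N else v
  let v := if max B1 B2 < N ∨ (B1 < B2 ∧ A = N) then PySem.Set.add v 0 else v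
  let v := if B2 < B1 then PySem.Set.add v A else v
  v

theorem pvStep_count_one (N b : Nat) : (pvStep N b).count 1 = b := by
  simp [pvStep, List.count_append, List.count_replicate]

theorem pvStep_inj {N b b' : Nat} (h : pvStep N b = pvStep N b') : b = b' := by
  have := congrArg (List.count 1) h
  simpa [pvStep_count_one] using this

theorem pvAnti_ne_step {N A b : Nat} (h0 : 0 < A) (hN : A < N) : pvAnti N A ≠ pvStep N b := by
  intro h
  rcases Nat.eq_zero_or_pos b with hb | hb
  · have := congrArg (List.count 1) h.symm
    simp [pvStep_count_one, pvAnti, List.count_append, List.count_replicate, hb] at this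
    omega
  · have := congrArg List.head? h
    rcases A with _ | A; · omega
    rcases b with _ | b; · omega
    simp [pvAnti, pvStep, List.replicate_succ] at this

theorem pv_getD_two_blocks {α : Type} (A m : Nat) (P Q d : α) (i : Nat) (hi : i < A + m) :
    (List.replicate A P ++ List.replicate m Q).getD i d = if i < A then P else Q := by
  rw [List.getD_eq_getElem _ _ (by simp; omega)]
  by_cases h : i < A
  · rw [List.getElem_append_left (by simpa)]
    simp [h]
  · rw [List.getElem_append_right (by simpa using h)]
    simp [h]

theorem pv_map_range_ite {α : Type} (A N : Nat) (h : A ≤ N) (x y : α) :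
    (List.range N).map (fun i => if i < A then x else y) =
      List.replicate A x ++ List.replicate (N - A) y := by
  obtain ⟨m, rfl⟩ : ∃ m, N = A + m := ⟨N - A, by omega⟩
  rw [List.range_add, List.map_append, List.map_map]
  congr 1
  · apply List.eq_replicate_iff.2
    refine ⟨by simp, ?_⟩
    intro b hb
    simp only [List.mem_map, List.mem_range] at hb
    obtain ⟨i, hi, rfl⟩ := hb
    simp [hi]
  · apply List.eq_replicate_iff.2
    refine ⟨by simp, ?_⟩
    intro b hb
    simp only [Function.comp, List.mem_map, List.mem_range] at hb
    obtain ⟨i, hi, rfl⟩ := hb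
    simp

theorem pvRepeat_step (n b : Int) (h0 : 0 ≤ b) (h1 : b ≤ n) :
    pvRepeat (1 : Int) b ++ pvRepeat 0 (n - b) = pvStep n.toNat b.toNat := by
  simp only [pvRepeat, pvStep]
  congr 2
  omega

theorem pv_rep_all (A N : Nat) (h : A ≤ N) (x : Int) :
    List.replicate A x ++ List.replicate (N - A) x = List.replicate N x := by
  rw [← List.replicate_add]
  congr 1
  omega

theorem pv_step_all_one (N : Nat) : pvStep N N = List.replicate N (1 : Int) := by
  simp [pvStep]

theorem pv_step_all_zero (N : Nat) : pvStep N 0 = List.replicate N (0 : Int) := by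
  simp [pvStep]

theorem pv_mem_iteFinset {c : Prop} [Decidable c] (v x : List Int) :
    (x ∈ (if c then ({v} : Finset (List Int)) else ∅)) ↔ c ∧ x = v := by
  split_ifs with h <;> simp [h]

theorem pv_len_ofList {α : Type} [BEq α] [LawfulBEq α] [DecidableEq α] (L : List α) :
    (PySem.Set.ofList L).length = L.toFinset.card := by
  rw [← List.toFinset_card_of_nodup (PySem.Set.nodup_ofList L)]
  congr 1
  ext x
  simp [PySem.Set.mem_ofList]

theorem pv_nodup_pvVals (N A B1 B2 : Nat) : (pvVals N A B1 B2).Nodup := by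
  simp only [pvVals]
  split_ifs <;>
    (repeat first | apply PySem.Set.nodup_add | exact List.nodup_nil)

theorem pv_mem_ite_add {c : Prop} [Decidable c] (s : PySem.Set Int) (x z : Int) :
    z ∈ (if c then PySem.Set.add s x else s) ↔ z ∈ s ∨ (c ∧ z = x) := by
  split_ifs with h <;> simp [PySem.Set.mem_add, h]

theorem pv_mem_pvVals (N A B1 B2 : Nat) (z : Int) :
    z ∈ pvVals N A B1 B2 ↔
      (0 < A ∧ z = B1) ∨ (A < N ∧ z = B2) ∨
      ((0 < min B1 B2 ∨ (B1 < B2 ∧ A = 0)) ∧ z = N) ∨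
      ((max B1 B2 < N ∨ (B1 < B2 ∧ A = N)) ∧ z = 0) ∨ (B2 < B1 ∧ z = A) := by
  simp only [pvVals, pv_mem_ite_add, PySem.Set.empty, List.not_mem_nil, false_or]
  tauto

theorem pv_nonneg_pvVals (N A B1 B2 : Nat) (z : Int) (h : z ∈ pvVals N A B1 B2) : 0 ≤ z := by
  rw [pv_mem_pvVals] at h
  rcases h with ⟨_, rfl⟩ | ⟨_, rfl⟩ | ⟨_, rfl⟩ | ⟨_, rfl⟩ | ⟨_, rfl⟩ <;> positivity

-- the closed form of the pattern set A collects: rows, then one column per j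
theorem pv_patterns_closed (n : Int) (A : Nat) (hA : A ≤ n.toNat)
    (P Q : List Int) :
    pvPatterns n (List.replicate A P ++ List.replicate (n.toNat - A) Q) =
      PySem.Set.ofList ((List.replicate A P ++ List.replicate (n.toNat - A) Q) ++
        (List.range n.toNat).map (fun j =>
          List.replicate A (P.getD j 0) ++ List.replicate (n.toNat - A) (Q.getD j 0))) := by
  simp only [pvPatterns]
  have h1 : List.foldl (fun (s : PySem.Set (List Int)) row => s.add row) PySem.Set.empty
      (List.replicate A P ++ List.replicate (n.toNat - A) Q) =
      PySem.Set.ofList (List.replicate A P ++ List.replicate (n.toNat - A) Q) :=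
    (PySem.Set.ofList_eq_foldl _).symm
  rw [h1, ← PySem.Set.update_map_eq_foldl_add, ← PySem.Set.ofList_append]
  congr 1
  rw [PySem.List.pyRange_zero, List.map_map]
  congr 1
  apply List.map_congr_left
  intro j hj
  rw [List.mem_range] at hj
  simp only [Function.comp]
  rw [List.map_map]
  have hlen : ∀ i : Nat, i < n.toNat →
      PySem.List.pyGetD (List.replicate A P ++ List.replicate (n.toNat - A) Q) (i : Int) [] =
        if i < A then P else Q := by
    intro i hi
    rw [PySem.List.pyGetD_natCast]
    exact pv_getD_two_blocks A (n.toNat - A) P Q [] i (by omega)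
  have : (List.range n.toNat).map
      ((fun i => PySem.List.pyGetD (PySem.List.pyGetD (List.replicate A P ++ List.replicate (n.toNat - A) Q) i []) (j : Int) 0) ∘ (fun k : Nat => (k : Int))) =
      (List.range n.toNat).map (fun i => if i < A then P.getD j 0 else Q.getD j 0) := by
    apply List.map_congr_left
    intro i hi
    rw [List.mem_range] at hi
    simp only [Function.comp]
    rw [hlen i hi]
    rw [apply_ite (fun L => PySem.List.pyGetD L (j : Int) 0)]
    simp [PySem.List.pyGetD_natCast]
  rw [this, pv_map_range_ite A n.toNat hA]

-- A's `matrix2` equals A's `matrix`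
theorem pv_matrix2 (n a : Int) (hn : 0 ≤ n) (ha : 0 ≤ a) (ha' : a ≤ n) (P Q : List Int) :
    (PySem.List.pyRange 0 n 1).foldl
      (fun m i => m ++ [if PySem.List.pyGetD (pvRepeat (1 : Int) a ++ pvRepeat 0 (n - a)) i 0 ≠ 0
                        then P else Q]) [] =
    pvRepeat P a ++ pvRepeat Q (n - a) := by
  rw [PySem.List.foldl_append_singleton_eq_map, List.nil_append]
  rw [PySem.List.pyRange_zero, List.map_map]
  have key : ∀ i ∈ List.range n.toNat,
      ((fun i => if PySem.List.pyGetD (pvRepeat (1 : Int) a ++ pvRepeat 0 (n - a)) i 0 ≠ 0 then P else Q) ∘ (fun k : Nat => (k : Int))) i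
        = if i < a.toNat then P else Q := by
    intro i hi
    rw [List.mem_range] at hi
    simp only [Function.comp]
    rw [PySem.List.pyGetD_natCast]
    have : (pvRepeat (1 : Int) a ++ pvRepeat 0 (n - a)).getD i 0 = if i < a.toNat then 1 else 0 := by
      have h2 : (n - a).toNat = n.toNat - a.toNat := by omega
      simp only [pvRepeat, h2]
      exact pv_getD_two_blocks a.toNat (n.toNat - a.toNat) 1 0 0 i (by omega)
    rw [this]
    split_ifs with h1 h2 h2 <;> simp_all
  rw [List.map_congr_left key, pv_map_range_ite a.toNat n.toNat (by omega)]
  simp only [pvRepeat]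
  congr 2
  omega

-- the core count: A's number of distinct patterns = B's analytic count
set_option maxHeartbeats 1000000 in
theorem pv_count (N A B1 B2 : Nat) (hN : 1 ≤ N) (hA : A ≤ N) (hB1 : B1 ≤ N) (hB2 : B2 ≤ N) :
    (PySem.Set.ofList ((List.replicate A (pvStep N B1) ++ List.replicate (N - A) (pvStep N B2)) ++
      (List.range N).map (fun j =>
        List.replicate A ((pvStep N B1).getD j 0) ++
        List.replicate (N - A) ((pvStep N B2).getD j 0)))).length =
    (pvVals N A B1 B2).length + (if B1 < B2 ∧ 0 < A ∧ A < N then 1 else 0) := by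
  have hcolmap : (List.range N).map (fun j =>
        List.replicate A ((pvStep N B1).getD j 0) ++
        List.replicate (N - A) ((pvStep N B2).getD j 0)) =
      (List.range N).map (fun j =>
        List.replicate A (if j < B1 then (1:Int) else 0) ++
        List.replicate (N - A) (if j < B2 then (1:Int) else 0)) := by
    apply List.map_congr_left
    intro j hj
    rw [List.mem_range] at hj
    rw [show pvStep N B1 = List.replicate B1 (1:Int) ++ List.replicate (N - B1) 0 from rfl,
        show pvStep N B2 = List.replicate B2 (1:Int) ++ List.replicate (N - B2) 0 from rfl,
        pv_getD_two_blocks B1 (N - B1) 1 0 0 j (by omega),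
        pv_getD_two_blocks B2 (N - B2) 1 0 0 j (by omega)]
  rw [hcolmap, pv_len_ofList, ← List.toFinset_card_of_nodup (pv_nodup_pvVals N A B1 B2)]
  have key : ((List.replicate A (pvStep N B1) ++ List.replicate (N - A) (pvStep N B2)) ++
      (List.range N).map (fun j =>
        List.replicate A (if j < B1 then (1:Int) else 0) ++
        List.replicate (N - A) (if j < B2 then (1:Int) else 0))).toFinset =
      (pvVals N A B1 B2).toFinset.image (fun z : Int => pvStep N z.toNat) ∪
        (if B1 < B2 ∧ 0 < A ∧ A < N then ({pvAnti N A} : Finset (List Int)) else ∅) := by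
    ext x
    simp only [List.mem_toFinset, Finset.mem_union, Finset.mem_image, List.mem_append,
      List.mem_replicate, List.mem_map, List.mem_range, pv_mem_pvVals, pv_mem_iteFinset]
    constructor
    · rintro ((⟨hA0, rfl⟩ | ⟨hAN', rfl⟩) | ⟨j, hj, rfl⟩)
      · exact Or.inl ⟨(B1 : Int), Or.inl ⟨by omega, rfl⟩, by simp⟩
      · exact Or.inl ⟨(B2 : Int), Or.inr (Or.inl ⟨by omega, rfl⟩), by simp⟩
      · by_cases hjb1 : j < B1 <;> by_cases hjb2 : j < B2
        · refine Or.inl ⟨(N : Int), Or.inr (Or.inr (Or.inl ⟨Or.inl (by omega), rfl⟩)), ?_⟩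
          simp only [hjb1, hjb2, if_pos]
          rw [pv_rep_all A N hA, Int.toNat_natCast, pv_step_all_one]
        · refine Or.inl ⟨(A : Int), Or.inr (Or.inr (Or.inr (Or.inr ⟨by omega, rfl⟩))), ?_⟩
          simp only [hjb1, hjb2, if_pos, Int.toNat_natCast]
          simp [hjb2, pvStep]
        · have hb12 : B1 < B2 := by omega
          rcases Nat.eq_zero_or_pos A with hA0 | hA0
          · refine Or.inl ⟨(N : Int), Or.inr (Or.inr (Or.inl ⟨Or.inr ⟨hb12, hA0⟩, rfl⟩)), ?_⟩
            subst hA0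
            simp only [hjb1, hjb2, if_neg, if_pos, Nat.sub_zero, List.replicate_zero,
              List.nil_append, Int.toNat_natCast, pv_step_all_one]
          · rcases Nat.lt_or_ge A N with hAN | hAN'
            · refine Or.inr ⟨⟨hb12, hA0, hAN⟩, ?_⟩
              simp only [hjb1, hjb2, if_neg, if_pos]
              rfl
            · have hAN2 : A = N := by omega
              refine Or.inl ⟨(0 : Int), Or.inr (Or.inr (Or.inr (Or.inl ⟨Or.inr ⟨hb12, hAN2⟩, rfl⟩))), ?_⟩
              subst hAN2
              simp [hjb1, hjb2, pv_step_all_zero]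
        · refine Or.inl ⟨(0 : Int), Or.inr (Or.inr (Or.inr (Or.inl ⟨Or.inl (by omega), rfl⟩))), ?_⟩
          simp only [hjb1, hjb2, if_neg, Int.toNat_zero, pv_step_all_zero]
          rw [pv_rep_all A N hA]
          simp
    · rintro (⟨z, hz, rfl⟩ | ⟨⟨h12, h0A, hAN⟩, rfl⟩)
      · rcases hz with ⟨h, rfl⟩ | ⟨h, rfl⟩ | ⟨hc, rfl⟩ | ⟨hc, rfl⟩ | ⟨h, rfl⟩
        · exact Or.inl (Or.inl ⟨by omega, by simp⟩)
        · exact Or.inl (Or.inr ⟨by omega, by simp⟩)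
        · rcases hc with hmin | ⟨hb12, hA0⟩
          · refine Or.inr ⟨0, by omega, ?_⟩
            simp only [show 0 < B1 by omega, show 0 < B2 by omega, if_pos, Int.toNat_natCast]
            rw [pv_rep_all A N hA, pv_step_all_one]
          · refine Or.inr ⟨B1, by omega, ?_⟩
            subst hA0
            simp only [Nat.lt_irrefl, if_neg, hb12, if_pos, Nat.sub_zero, List.replicate_zero,
              List.nil_append, Int.toNat_natCast, pv_step_all_one]
        · rcases hc with hmax | ⟨hb12, hAN2⟩
          · refine Or.inr ⟨max B1 B2, by omega, ?_⟩
            simp only [show ¬ (max B1 B2 < B1) by omega, show ¬ (max B1 B2 < B2) by omega,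
              if_neg, Int.toNat_zero, pv_step_all_zero]
            rw [pv_rep_all A N hA]
            simp
          · refine Or.inr ⟨B1, by omega, ?_⟩
            subst hAN2
            simp [hb12, pv_step_all_zero]
        · refine Or.inr ⟨B2, by omega, ?_⟩
          simp [h, Nat.lt_irrefl, pvStep]
      · refine Or.inr ⟨B1, by omega, ?_⟩
        simp only [Nat.lt_irrefl, if_neg, h12, if_pos]
        rfl
  rw [key]
  have hdisj : Disjoint ((pvVals N A B1 B2).toFinset.image (fun z : Int => pvStep N z.toNat))
      (if B1 < B2 ∧ 0 < A ∧ A < N then ({pvAnti N A} : Finset (List Int)) else ∅) := by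
    split_ifs with hc
    · rw [Finset.disjoint_singleton_right]
      rintro hmem
      rw [Finset.mem_image] at hmem
      obtain ⟨z, _, hz⟩ := hmem
      exact pvAnti_ne_step hc.2.1 hc.2.2 hz.symm
    · exact Finset.disjoint_empty_right _
  rw [Finset.card_union_of_disjoint hdisj]
  have hinj : ((pvVals N A B1 B2).toFinset.image (fun z : Int => pvStep N z.toNat)).card =
      (pvVals N A B1 B2).toFinset.card := by
    apply Finset.card_image_of_injOn
    intro z hz w hw hzw
    simp only [Finset.mem_coe, List.mem_toFinset] at hz hw
    have hz0 := pv_nonneg_pvVals N A B1 B2 z hz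
    have hw0 := pv_nonneg_pvVals N A B1 B2 w hw
    have := pvStep_inj hzw
    omega
  rw [hinj]
  congr 1
  split_ifs <;> simp

-- B's Int-level `vals` is `pvVals` over the naturals
theorem pv_vals_cast (n a b1 b2 : Int) (ha : 0 ≤ a) (ha' : a ≤ n)
    (hb1 : 0 ≤ b1) (hb1' : b1 ≤ n) (hb2 : 0 ≤ b2) (hb2' : b2 ≤ n) :
    (if b2 < b1 then
       PySem.Set.add
         (if max b1 b2 < n ∨ (b1 < b2 ∧ a = n) then
            PySem.Set.add
              (if 0 < min b1 b2 ∨ (b1 < b2 ∧ a = 0) then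
                 PySem.Set.add
                   (if a < n then
                      PySem.Set.add (if 0 < a then PySem.Set.add PySem.Set.empty b1 else PySem.Set.empty) b2
                    else if 0 < a then PySem.Set.add PySem.Set.empty b1 else PySem.Set.empty) n
               else if a < n then
                      PySem.Set.add (if 0 < a then PySem.Set.add PySem.Set.empty b1 else PySem.Set.empty) b2
                    else if 0 < a then PySem.Set.add PySem.Set.empty b1 else PySem.Set.empty) 0
          else
            if 0 < min b1 b2 ∨ (b1 < b2 ∧ a = 0) then
              PySem.Set.add
                (if a < n then
                   PySem.Set.add (if 0 < a then PySem.Set.add PySem.Set.empty b1 else PySem.Set.empty) b2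
                 else if 0 < a then PySem.Set.add PySem.Set.empty b1 else PySem.Set.empty) n
            else if a < n then
                   PySem.Set.add (if 0 < a then PySem.Set.add PySem.Set.empty b1 else PySem.Set.empty) b2
                 else if 0 < a then PySem.Set.add PySem.Set.empty b1 else PySem.Set.empty) a
     else
       if max b1 b2 < n ∨ (b1 < b2 ∧ a = n) then
         PySem.Set.add
           (if 0 < min b1 b2 ∨ (b1 < b2 ∧ a = 0) then
              PySem.Set.add
                (if a < n then
                   PySem.Set.add (if 0 < a then PySem.Set.add PySem.Set.empty b1 else PySem.Set.empty) b2
                 else if 0 < a then PySem.Set.add PySem.Set.empty b1 else PySem.Set.empty) n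
            else if a < n then
                   PySem.Set.add (if 0 < a then PySem.Set.add PySem.Set.empty b1 else PySem.Set.empty) b2
                 else if 0 < a then PySem.Set.add PySem.Set.empty b1 else PySem.Set.empty) 0
       else
         if 0 < min b1 b2 ∨ (b1 < b2 ∧ a = 0) then
           PySem.Set.add
             (if a < n then
                PySem.Set.add (if 0 < a then PySem.Set.add PySem.Set.empty b1 else PySem.Set.empty) b2
              else if 0 < a then PySem.Set.add PySem.Set.empty b1 else PySem.Set.empty) n
         else if a < n then
                PySem.Set.add (if 0 < a then PySem.Set.add PySem.Set.empty b1 else PySem.Set.empty) b2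
              else if 0 < a then PySem.Set.add PySem.Set.empty b1 else PySem.Set.empty) =
    pvVals n.toNat a.toNat b1.toNat b2.toNat := by
  obtain ⟨N, rfl⟩ : ∃ N : Nat, n = (N : Int) := ⟨n.toNat, by omega⟩
  obtain ⟨A, rfl⟩ : ∃ A : Nat, a = (A : Int) := ⟨a.toNat, by omega⟩
  obtain ⟨B1, rfl⟩ : ∃ B1 : Nat, b1 = (B1 : Int) := ⟨b1.toNat, by omega⟩
  obtain ⟨B2, rfl⟩ : ∃ B2 : Nat, b2 = (B2 : Int) := ⟨b2.toNat, by omega⟩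
  simp only [pvVals, Int.toNat_natCast]
  norm_cast

theorem pv_bodyA_closed (n k b1 b2 a mc : Int) (hk : k ≠ 0)
    (hb1 : 0 ≤ b1) (hb1' : b1 ≤ n) (hb2 : 0 ≤ b2) (hb2' : b2 ≤ n)
    (ha : 0 ≤ a) (ha' : a ≤ n) :
    pvBodyA n k b1 b2 a mc =
      if a * b1 + (n - a) * b2 = k then min mc (pvCompB n b1 b2 a) else mc := by
  simp only [pvBodyA, pvCompB]
  by_cases hg : a * b1 + (n - a) * b2 ≠ k
  · rw [if_pos hg, if_neg (by omega)]
  · push_neg at hg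
    rw [if_neg (by omega), if_pos hg]
    have hn1 : 1 ≤ n := by
      by_contra hlt
      have hn0 : n = 0 := by omega
      subst hn0
      have ha0 : a = 0 := by omega
      have hb20 : b2 = 0 := by omega
      subst ha0; subst hb20
      simp at hg
      exact hk hg.symm
    rw [pvRepeat_step n b1 hb1 hb1', pvRepeat_step n b2 hb2 hb2']
    have hM : pvRepeat (pvStep n.toNat b1.toNat) a ++ pvRepeat (pvStep n.toNat b2.toNat) (n - a) =
        List.replicate a.toNat (pvStep n.toNat b1.toNat) ++
          List.replicate (n.toNat - a.toNat) (pvStep n.toNat b2.toNat) := by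
      simp only [pvRepeat]
      congr 2
      omega
    rw [hM, pv_patterns_closed n a.toNat (by omega) _ _]
    rw [pv_matrix2 n a (by omega) ha ha' _ _, hM, pv_patterns_closed n a.toNat (by omega) _ _]
    have hmin : ∀ C : Int, min (min mc C) C = min mc C := by
      intro C
      rw [min_assoc, min_self]
    rw [hmin _, ite_self]
    congr 1
    rw [pv_vals_cast n a b1 b2 ha ha' hb1 hb1' hb2 hb2']
    have hiff : (b1 < b2 ∧ 0 < a ∧ a < n) ↔
        (b1.toNat < b2.toNat ∧ 0 < a.toNat ∧ a.toNat < n.toNat) := by omega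
    rw [if_congr hiff rfl rfl]
    have hc := pv_count n.toNat a.toNat b1.toNat b2.toNat (by omega) (by omega) (by omega) (by omega)
    simp only [PySem.Set.len]
    by_cases hcnd : b1.toNat < b2.toNat ∧ 0 < a.toNat ∧ a.toNat < n.toNat
    · rw [if_pos hcnd] at hc ⊢
      exact_mod_cast hc
    · rw [if_neg hcnd] at hc ⊢
      exact_mod_cast hc

-- with equal row weights the analytic count does not depend on a
theorem pv_compB_const (n b1 a : Int) (hn : 1 ≤ n) (ha : 0 ≤ a) (ha' : a ≤ n) :
    pvCompB n b1 b1 a = pvCompB n b1 b1 0 := by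
  have hn' : (0:Int) < n := by omega
  by_cases h2 : 0 < a <;> by_cases h3 : a < n
  · simp [pvCompB, h2, h3, hn', lt_irrefl, min_self, max_self, PySem.Set.add, PySem.Set.empty]
  · simp [pvCompB, h2, h3, hn', lt_irrefl, min_self, max_self, PySem.Set.add, PySem.Set.empty]
  · simp [pvCompB, h2, h3, hn', lt_irrefl, min_self, max_self, PySem.Set.add, PySem.Set.empty]
  · omega

theorem pv_foldl_id (l : List Int) (mc : Int) : l.foldl (fun m (_ : Int) => m) mc = mc := by
  induction l with
  | nil => rfl
  | cons x t ih => simpa using ih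

theorem pv_foldl_min_const_aux (l : List Int) (c : Int) :
    ∀ mc : Int, l.foldl (fun m (_ : Int) => min m c) (min mc c) = min mc c := by
  induction l with
  | nil => intro mc; rfl
  | cons x t ih =>
    intro mc
    rw [List.foldl_cons, show min (min mc c) c = min mc c from by rw [min_assoc, min_self]]
    exact ih mc

theorem pv_foldl_min_const (l : List Int) (c mc : Int) (hl : l ≠ []) :
    l.foldl (fun m (_ : Int) => min m c) mc = min mc c := by
  cases l with
  | nil => exact absurd rfl hl
  | cons x t =>
    rw [List.foldl_cons]
    exact pv_foldl_min_const_aux t c mc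

theorem pv_foldl_unique (l : List Int) (p : Int → Prop) [DecidablePred p]
    (C : Int → Int) (a0 : Int) (hnd : l.Nodup) (h : ∀ a ∈ l, p a ↔ a = a0) :
    ∀ mc : Int, l.foldl (fun m a => if p a then min m (C a) else m) mc =
      if a0 ∈ l then min mc (C a0) else mc := by
  induction l with
  | nil => intro mc; simp
  | cons x t ih =>
    intro mc
    rw [List.foldl_cons]
    have hx := h x List.mem_cons_self
    have hndt := (List.nodup_cons.1 hnd).2
    have hxt := (List.nodup_cons.1 hnd).1
    by_cases hpx : p x
    · have hxa : x = a0 := hx.1 hpx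
      subst hxa
      rw [if_pos hpx]
      have hrest : t.foldl (fun m a => if p a then min m (C a) else m) (min mc (C x)) =
          min mc (C x) := by
        rw [PySem.List.foldl_congr_mem t _ (fun m _ => m) _ (by
          intro m a hat
          rw [if_neg]
          intro hpa
          exact hxt (((h a (List.mem_cons_of_mem _ hat)).1 hpa) ▸ hat))]
        exact pv_foldl_id t _
      rw [hrest, if_pos List.mem_cons_self]
    · rw [if_neg hpx]
      have hxa : x ≠ a0 := fun he => hpx (hx.2 he)
      rw [ih hndt (fun a hat => h a (List.mem_cons_of_mem _ hat)) mc]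
      have hmem : (a0 ∈ t) ↔ (a0 ∈ x :: t) := by
        rw [List.mem_cons]
        constructor
        · exact Or.inr
        · rintro (h' | h')
          · exact absurd h'.symm hxa
          · exact h'
      exact if_congr hmem rfl rfl

theorem pv_inner_eq (n k b1 b2 mc : Int) (hk : k ≠ 0)
    (hb1 : 0 ≤ b1) (hb1' : b1 ≤ n) (hb2 : 0 ≤ b2) (hb2' : b2 ≤ n) :
    (PySem.List.pyRange 0 (n + 1) 1).foldl (fun mc a => pvBodyA n k b1 b2 a mc) mc =
      pvBodyB n k b1 b2 mc := by
  have hn0 : (0:Int) ≤ n := le_trans hb1 hb1'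
  rw [PySem.List.foldl_congr_mem _ _
    (fun mc a => if a * b1 + (n - a) * b2 = k then min mc (pvCompB n b1 b2 a) else mc) mc (by
      intro m a hma
      rw [PySem.List.mem_pyRange_one] at hma
      exact pv_bodyA_closed n k b1 b2 a m hk hb1 hb1' hb2 hb2' hma.1 (by omega))]
  have hne : PySem.List.pyRange 0 (n + 1) 1 ≠ [] := by
    apply List.ne_nil_of_length_pos
    rw [PySem.List.length_pyRange_one]
    omega
  simp only [pvBodyB]
  by_cases hbb : b1 = b2
  · subst hbb
    rw [if_pos rfl]
    by_cases hnk : n * b1 = k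
    · rw [if_neg (not_not_intro hnk)]
      have hn1 : (1:Int) ≤ n := by
        by_contra hlt
        have hn00 : n = 0 := by omega
        rw [hn00] at hnk
        simp at hnk
        exact hk hnk.symm
      rw [PySem.List.foldl_congr_mem _ _ (fun m _ => min m (pvCompB n b1 b1 0)) mc (by
        intro m a hma
        rw [PySem.List.mem_pyRange_one] at hma
        rw [if_pos (by linear_combination hnk),
          pv_compB_const n b1 a hn1 hma.1 (by omega)])]
      exact pv_foldl_min_const _ _ _ hne
    · rw [if_pos hnk]
      rw [PySem.List.foldl_congr_mem _ _ (fun m _ => m) mc (by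
        intro m a _
        rw [if_neg]
        intro he
        exact hnk (by linear_combination he))]
      exact pv_foldl_id _ _
  · rw [if_neg hbb]
    have hden : b1 - b2 ≠ 0 := sub_ne_zero.mpr hbb
    by_cases hdvd : PySem.Int.mod (k - n * b2) (b1 - b2) = 0
    · rw [if_neg (not_not_intro hdvd)]
      rw [PySem.Int.mod_eq_zero_iff_dvd] at hdvd
      obtain ⟨q, hq⟩ := hdvd
      have hfd : PySem.Int.floordiv (k - n * b2) (b1 - b2) = q := by
        have h1 := PySem.Int.floordiv_mul_add_mod (k - n * b2) (b1 - b2)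
        have h2 : PySem.Int.mod (k - n * b2) (b1 - b2) = 0 :=
          (PySem.Int.mod_eq_zero_iff_dvd _ _).2 ⟨q, hq⟩
        rw [h2, add_zero] at h1
        have h3 : PySem.Int.floordiv (k - n * b2) (b1 - b2) * (b1 - b2) = q * (b1 - b2) := by
          rw [h1, hq]; ring
        exact mul_right_cancel₀ hden h3
      rw [hfd]
      have hguard : ∀ a : Int, (a * b1 + (n - a) * b2 = k) ↔ a = q := by
        intro a
        constructor
        · intro he
          have h3 : a * (b1 - b2) = q * (b1 - b2) := by linear_combination he + hq
          exact mul_right_cancel₀ hden h3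
        · rintro rfl
          linear_combination -hq
      rw [pv_foldl_unique _ _ _ q (PySem.List.nodup_pyRange_one _ _) (fun a _ => hguard a) mc]
      by_cases hr : q < 0 ∨ q > n
      · rw [if_pos hr, if_neg]
        rw [PySem.List.mem_pyRange_one]
        omega
      · rw [if_neg hr, if_pos]
        rw [PySem.List.mem_pyRange_one]
        omega
    · rw [if_pos hdvd]
      rw [PySem.List.foldl_congr_mem _ _ (fun m _ => m) mc (by
        intro m a _
        rw [if_neg]
        intro he
        apply hdvd
        rw [PySem.Int.mod_eq_zero_iff_dvd]
        exact ⟨a, by linear_combination -he⟩)]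
      exact pv_foldl_id _ _

theorem find_min_complexity_eq (n k : Int) : find_min_complexity n k = find_min_complexity_alt n k := by
  unfold find_min_complexity find_min_complexity_alt
  split_ifs with h
  · rfl
  · have hk : k ≠ 0 := by
      intro hk0
      exact h (Or.inl hk0)
    apply PySem.List.foldl_congr_mem
    intro mc b1 hb1
    apply PySem.List.foldl_congr_mem
    intro mc' b2 hb2
    rw [PySem.List.mem_pyRange_one] at hb1 hb2
    exact pv_inner_eq n k b1 b2 mc' hk hb1.1 (by omega) hb2.1 (by omega)

-- ===== VERDICT (by name: the statement is the Claim_ definition above) =====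
theorem find_min_complexity_spec : Claim_equal_find_min_complexity := by
  intro n k _
  unfold Spec_find_min_complexity
  exact find_min_complexity_eq n k
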